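-- pv_equiv track=rewrite | github.com/diegobq/ejercicios_python | Clase04/propaga.py | propagar
-- ===== SOURCE A (Python) =====
-- def propagar(lista):
--     NUEVO = 0
--     ENCENDIDO = 1
--     CARBONIZADO = -1
--     propagada = []
--     fosforos_previos = []
--     necesita_propagar = False
--
--     for i, fosforo in enumerate(lista):
--         fosforo_propagado = fosforo
--         if fosforo == NUEVO:
--             if necesita_propagar:
--                 # encendemos el fosforo nuevo
--                 fosforo_propagado = ENCENDIDO
--             else:
--                 # guardamos la posicion en fosforos_previos
--                 fosforos_previos.append(i)
--         elif fosforo == CARBONIZADO: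
--             # no hay propagacion hacia adelante
--             necesita_propagar = False
--             # no hay propagacion hacia atras
--             fosforos_previos = []
--         elif fosforo == ENCENDIDO:
--             # hay propagacion hacia adelante
--             necesita_propagar = True
--             # propagamos hacia atras
--             for index_fosforo_previo in fosforos_previos:
--                 propagada[index_fosforo_previo] = ENCENDIDO
--
--         propagada.append(fosforo_propagado)
--
--     return propagada
-- ===== SOURCE B (Python) =====
-- def propagar(lista):
--     NUEVO = 0
--     ENCENDIDO = 1
--     CARBONIZADO = -1
--     # forward pass: flags[i] = True iff a lit match at or before i with no charred one after it
--     flags = []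
--     burning = False
--     for fosforo in lista:
--         if fosforo == ENCENDIDO:
--             burning = True
--         elif fosforo == CARBONIZADO:
--             burning = False
--         flags.append(burning)
--     # backward pass, building the result back-to-front
--     propagada = []
--     burning = False
--     for fosforo, adelante in zip(reversed(lista), reversed(flags)):
--         if fosforo == ENCENDIDO:
--             burning = True
--         elif fosforo == CARBONIZADO:
--             burning = False
--         if fosforo == NUEVO and (adelante or burning):
--             propagada.append(ENCENDIDO)
--         else:
--             propagada.append(fosforo)
--     propagada.reverse()
--     return propagada
-- ===== Notes on version B (the rewrite author's own statement) =====
-- stated objective: alternative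
-- what changed: Replaces the stateful pending-index bookkeeping (a list of positions that is re-scanned and mutated in place on every lit match, and never cleared after propagation) with two flag passes: a forward pass recording whether fire propagates forward at each position and a backward pass that tracks backward propagation while emitting the result, so no index list and no in-place updates remain.
import Mathlib
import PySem

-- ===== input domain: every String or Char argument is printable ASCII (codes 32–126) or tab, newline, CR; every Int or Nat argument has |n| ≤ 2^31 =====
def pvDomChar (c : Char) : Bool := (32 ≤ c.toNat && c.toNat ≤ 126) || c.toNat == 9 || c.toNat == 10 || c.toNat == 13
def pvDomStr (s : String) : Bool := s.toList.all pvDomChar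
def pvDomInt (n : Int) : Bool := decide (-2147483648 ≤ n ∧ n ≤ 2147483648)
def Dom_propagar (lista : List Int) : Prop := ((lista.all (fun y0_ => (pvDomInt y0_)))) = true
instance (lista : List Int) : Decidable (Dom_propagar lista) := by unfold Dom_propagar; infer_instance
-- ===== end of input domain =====

-- B replaces A's pending-index bookkeeping (an index list re-scanned on every lit match and
-- never cleared, with in-place updates) by two flag passes (forward + backward), no mutation.


-- ===== PORT A =====
-- A's loop body: state = (propagada, fosforos_previos, necesita_propagar); the enumerate
-- index i is a Python int (always 0 ≤ i < len(propagada) when used), so `propagada[i] = 1`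
-- is ported exactly as `List.set` at `i.toNat`.
def propagarStep (s : List Int × List Int × Bool) (p : Int × Int) : List Int × List Int × Bool :=
  let propagada := s.1
  let previos := s.2.1
  let necesita := s.2.2
  let i := p.1
  let fosforo := p.2
  if fosforo = 0 then
    if necesita then (propagada ++ [1], previos, necesita)
    else (propagada ++ [fosforo], previos ++ [i], necesita)
  else if fosforo = -1 then (propagada ++ [fosforo], [], false)
  else if fosforo = 1 then
    (List.foldl (fun acc j => acc.set j.toNat 1) propagada previos ++ [fosforo], previos, true)
  else (propagada ++ [fosforo], previos, necesita)

def propagar (lista : List Int) : List Int :=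
  (List.foldl propagarStep ([], [], false) (PySem.List.enumerate lista)).1

-- ===== PORT B =====
-- forward pass of Source B: flags[i] = burning after seeing lista[0..i]
def propagarAltFwd (s : List Bool × Bool) (fosforo : Int) : List Bool × Bool :=
  let burning := if fosforo = 1 then true else if fosforo = -1 then false else s.2
  (s.1 ++ [burning], burning)

-- backward pass of Source B over zip(reversed(lista), reversed(flags)), appended then reversed
def propagarAltBwd (s : List Int × Bool) (p : Int × Bool) : List Int × Bool :=
  let fosforo := p.1
  let adelante := p.2
  let burning := if fosforo = 1 then true else if fosforo = -1 then false else s.2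
  (s.1 ++ [if fosforo = 0 ∧ (adelante ∨ burning) then 1 else fosforo], burning)

def propagar_alt (lista : List Int) : List Int :=
  let flags := (List.foldl propagarAltFwd ([], false) lista).1
  let propagada := (List.foldl propagarAltBwd ([], false) (lista.reverse.zip flags.reverse)).1
  propagada.reverse

-- ===== PRECONDITION & SPEC =====
def Spec_propagar (lista : List Int) (out : List Int) : Prop := out = propagar_alt lista
instance (lista : List Int) (out : List Int) : Decidable (Spec_propagar lista out) := by unfold Spec_propagar; infer_instance

-- ===== CLAIM (what is proved, stated in full; the proofs are below) =====
def Claim_equal_propagar : Prop := ∀ (lista : List Int), Dom_propagar lista → Spec_propagar lista (propagar lista)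

-- ===== LEMMAS AND PROOFS =====

-- reference function: G b xs = result of propagating, b = "fire arrives from the left"
def ignites : List Int → Bool
  | [] => false
  | x :: xs => if x = 1 then true else if x = -1 then false else ignites xs

def G (b : Bool) : List Int → List Int
  | [] => []
  | x :: xs =>
      if x = 1 then 1 :: G true xs
      else if x = -1 then (-1) :: G false xs
      else if x = 0 then (if b ∨ ignites xs then 1 else 0) :: G b xs
      else x :: G b xs

def setAll (p : List Int) (l : List Int) : List Int :=
  List.foldl (fun acc j => acc.set j.toNat 1) p l

theorem length_setAll (l p : List Int) : (setAll p l).length = p.length := by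
  induction l generalizing p with
  | nil => rfl
  | cons j l ih => simp [setAll, List.foldl_cons] at *; simpa using ih (p.set j.toNat 1)

theorem setAll_append (l p q : List Int) (h : ∀ j ∈ l, j.toNat < p.length) :
    setAll (p ++ q) l = setAll p l ++ q := by
  induction l generalizing p with
  | nil => rfl
  | cons j l ih =>
      simp only [setAll, List.foldl_cons] at *
      rw [List.set_append_left _ _ (h j (by simp))]
      exact ih (p.set j.toNat 1) (by simpa using fun a ha => h a (by simp [ha]))

theorem set_one_of_one (p : List Int) (k : Nat) (h : p[k]? = some 1) : p.set k 1 = p := by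
  apply List.ext_getElem?
  intro j
  rw [List.getElem?_set]
  split
  · next hc =>
      subst hc
      have : k < p.length := (List.getElem?_eq_some_iff.mp h).1
      simp [this, h.symm]
  · rfl

theorem setAll_of_ones (l p : List Int) (h : ∀ j ∈ l, p[j.toNat]? = some 1) :
    setAll p l = p := by
  induction l generalizing p with
  | nil => rfl
  | cons j l ih =>
      simp only [setAll, List.foldl_cons] at *
      rw [set_one_of_one p j.toNat (h j (by simp))]
      exact ih p (fun a ha => h a (by simp [ha]))

theorem setAll_preserve_one (l p : List Int) (k : Nat) (h : p[k]? = some 1) :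
    (setAll p l)[k]? = some 1 := by
  induction l generalizing p with
  | nil => simpa [setAll]
  | cons j l ih =>
      simp only [setAll, List.foldl_cons] at *
      apply ih (p.set j.toNat 1)
      rw [List.getElem?_set]
      split
      · next hc =>
          have : k < p.length := (List.getElem?_eq_some_iff.mp h).1
          simp [← hc] at this ⊢
          omega
      · exact h

theorem getElem?_setAll_mem (l p : List Int) (j : Int) (hj : j ∈ l) (hlt : j.toNat < p.length) :
    (setAll p l)[j.toNat]? = some 1 := by
  induction l generalizing p with
  | nil => simp at hj
  | cons a l ih =>
      simp only [setAll, List.foldl_cons]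
      rcases List.mem_cons.mp hj with h | h
      · subst h
        apply setAll_preserve_one
        rw [List.getElem?_set]
        simp [hlt]
      · exact ih (p.set a.toNat 1) h (by simpa)

-- invariant for A's loop: processing `rest` from state (prop, prev, nec) appends G nec rest,
-- back-patching prev exactly when the remainder ignites; prev entries are valid indices and,
-- when nec is set, already hold 1 (so A's redundant re-scans are no-ops).
theorem propagar_loop (rest : List Int) : ∀ (prop prev : List Int) (nec : Bool),
    (∀ j ∈ prev, 0 ≤ j ∧ j.toNat < prop.length) →
    (nec = true → ∀ j ∈ prev, prop[j.toNat]? = some 1) →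
    (List.foldl propagarStep (prop, prev, nec) (PySem.List.enumerate rest prop.length)).1
      = (if ignites rest then setAll prop prev else prop) ++ G nec rest := by
  induction rest with
  | nil => intro prop prev nec _ _; simp [ignites, G, PySem.List.enumerate_nil]
  | cons x xs ih =>
      intro prop prev nec hlen hones
      rw [PySem.List.enumerate_cons, List.foldl_cons]
      have hlt : ∀ j ∈ prev, j.toNat < prop.length := fun j hj => (hlen j hj).2
      by_cases h0 : x = 0
      · subst h0
        cases nec with
        | true =>
            have hset : setAll prop prev = prop := setAll_of_ones prev prop (hones rfl)
            have step : propagarStep (prop, prev, true) ((prop.length : Int), 0)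
                = (prop ++ [1], prev, true) := by simp [propagarStep]
            rw [step]
            have hrec := ih (prop ++ [1]) prev true
              (fun j hj => ⟨(hlen j hj).1, by have := hlt j hj; simp; omega⟩)
              (fun _ j hj => by
                rw [List.getElem?_append_left (hlt j hj)]; exact hones rfl j hj)
            rw [show (((prop ++ [1] : List Int).length : Nat) : Int) = (prop.length : Int) + 1 by
              simp] at hrec
            rw [hrec, setAll_append prev prop [1] hlt]
            simp only [ignites, G, hset]
            split <;> rename_i hq <;> simp [hq]
        | false =>
            have step : propagarStep (prop, prev, false) ((prop.length : Int), 0)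
                = (prop ++ [0], prev ++ [(prop.length : Int)], false) := by simp [propagarStep]
            rw [step]
            have hrec := ih (prop ++ [0]) (prev ++ [(prop.length : Int)]) false
              (fun j hj => by
                rcases List.mem_append.mp hj with h | h
                · have := hlen j h
                  exact ⟨this.1, by simp; omega⟩
                · simp at h; subst h; exact ⟨by positivity, by simp⟩)
              (by simp)
            rw [show (((prop ++ [0] : List Int).length : Nat) : Int) = (prop.length : Int) + 1 by
              simp] at hrec
            rw [hrec]
            have hsplit : setAll (prop ++ [0]) (prev ++ [(prop.length : Int)])
                = setAll prop prev ++ [1] := by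
              simp only [setAll, List.foldl_append, List.foldl_cons, List.foldl_nil]
              rw [show List.foldl (fun acc j => acc.set j.toNat 1) (prop ++ [0]) prev
                  = setAll prop prev ++ [0] from setAll_append prev prop [0] hlt]
              rw [List.set_append_right _ _ (by rw [length_setAll prev prop]; simp)]
              have hl : (List.foldl (fun acc j => acc.set j.toNat 1) prop prev).length
                  = prop.length := length_setAll prev prop
              simp [setAll, hl]
            simp only [ignites, G, hsplit]
            split <;> rename_i hq <;> simp [hq]
      · by_cases hm1 : x = -1
        · subst hm1
          have step : propagarStep (prop, prev, nec) ((prop.length : Int), -1)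
              = (prop ++ [-1], [], false) := by simp [propagarStep]
          rw [step]
          have hrec := ih (prop ++ [-1]) [] false (by simp) (by simp)
          rw [show (((prop ++ [-1] : List Int).length : Nat) : Int) = (prop.length : Int) + 1 by
            simp] at hrec
          rw [hrec]
          simp [ignites, G, setAll]
        · by_cases h1 : x = 1
          · subst h1
            have hvalid : ∀ j ∈ prev, (setAll prop prev ++ [1])[j.toNat]? = some 1 := fun j hj => by
              rw [List.getElem?_append_left (by simpa [length_setAll] using hlt j hj)]
              exact getElem?_setAll_mem prev prop j hj (hlt j hj)
            have step : propagarStep (prop, prev, nec) ((prop.length : Int), 1)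
                = (setAll prop prev ++ [1], prev, true) := by
              simp [propagarStep, setAll]
            rw [step]
            have hrec := ih (setAll prop prev ++ [1]) prev true
              (fun j hj => ⟨(hlen j hj).1, by
                have := hlt j hj; simp [length_setAll]; omega⟩)
              (fun _ => hvalid)
            rw [show (((setAll prop prev ++ [1] : List Int).length : Nat) : Int)
                = (prop.length : Int) + 1 by simp [length_setAll]] at hrec
            rw [hrec, setAll_of_ones prev _ hvalid]
            simp only [ignites, G]
            split <;> simp
          · have step : propagarStep (prop, prev, nec) ((prop.length : Int), x)
                = (prop ++ [x], prev, nec) := by simp [propagarStep, h0, hm1, h1]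
            rw [step]
            have hrec := ih (prop ++ [x]) prev nec
              (fun j hj => ⟨(hlen j hj).1, by have := hlt j hj; simp; omega⟩)
              (fun hn j hj => by
                rw [List.getElem?_append_left (hlt j hj)]; exact hones hn j hj)
            rw [show (((prop ++ [x] : List Int).length : Nat) : Int) = (prop.length : Int) + 1 by
              simp] at hrec
            rw [hrec, setAll_append prev prop [x] hlt]
            simp only [ignites, G, h0, hm1, h1, if_false]
            split <;> simp

theorem propagar_eq_G (lista : List Int) : propagar lista = G false lista := by
  have := propagar_loop lista [] [] false (by simp) (by simp)
  simpa [propagar, setAll] using this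

-- B side: the forward flags, as structural recursion
def F (b : Bool) : List Int → List Bool
  | [] => []
  | x :: xs =>
      let b' := if x = 1 then true else if x = -1 then false else b
      b' :: F b' xs

theorem fwd_acc (xs : List Int) : ∀ (acc : List Bool) (b : Bool),
    List.foldl propagarAltFwd (acc, b) xs
      = (acc ++ (List.foldl propagarAltFwd ([], b) xs).1,
         (List.foldl propagarAltFwd ([], b) xs).2) := by
  induction xs with
  | nil => intro acc b; simp
  | cons x xs ih =>
      intro acc b
      simp only [List.foldl_cons]
      rw [show propagarAltFwd (acc, b) x
          = (acc ++ [if x = 1 then true else if x = -1 then false else b],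
             if x = 1 then true else if x = -1 then false else b) from rfl,
        show propagarAltFwd ([], b) x
          = ([if x = 1 then true else if x = -1 then false else b],
             if x = 1 then true else if x = -1 then false else b) from rfl,
        ih (acc ++ [_]) _, ih [_] _]
      simp

theorem fwd_eq_F (xs : List Int) (b : Bool) :
    (List.foldl propagarAltFwd ([], b) xs).1 = F b xs := by
  induction xs generalizing b with
  | nil => rfl
  | cons x xs ih =>
      simp only [List.foldl_cons]
      rw [show propagarAltFwd ([], b) x
          = ([if x = 1 then true else if x = -1 then false else b],
             if x = 1 then true else if x = -1 then false else b) from rfl,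
        fwd_acc]
      simp [F, ih]

theorem length_F (b : Bool) (xs : List Int) : (F b xs).length = xs.length := by
  induction xs generalizing b with
  | nil => rfl
  | cons x xs ih => simp [F, ih]

theorem bwd_main (xs : List Int) (b : Bool) :
    List.foldl propagarAltBwd ([], false) (xs.reverse.zip (F b xs).reverse)
      = ((G b xs).reverse, ignites xs) := by
  induction xs generalizing b with
  | nil => simp [F, G, ignites]
  | cons x xs ih =>
      have hb' : F b (x :: xs) = (if x = 1 then true else if x = -1 then false else b)
          :: F (if x = 1 then true else if x = -1 then false else b) xs := rfl
      rw [hb']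
      simp only [List.reverse_cons]
      rw [List.zip_append (by simp [length_F]), List.foldl_append, ih]
      simp only [List.zip_cons_cons, List.zip_nil_right, List.foldl_cons, List.foldl_nil]
      rw [show ∀ (a : List Int) (c : Bool) (p : Int × Bool), propagarAltBwd (a, c) p
          = (a ++ [if p.1 = 0 ∧ (p.2 ∨ (if p.1 = 1 then true else if p.1 = -1 then false else c))
                   then 1 else p.1],
             if p.1 = 1 then true else if p.1 = -1 then false else c) from fun _ _ _ => rfl]
      by_cases h1 : x = 1
      · simp [h1, G, ignites]
      · by_cases hm1 : x = -1
        · simp [hm1, G, ignites]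
        · by_cases h0 : x = 0
          · subst h0
            simp only [ignites, G, if_neg h1, if_neg hm1, reduceIte, Prod.mk.injEq]
            refine ⟨?_, trivial⟩
            simp only [List.reverse_cons]
            congr 1
            by_cases hb : b <;> by_cases hi : ignites xs <;> simp [hb, hi]
          · simp [h1, hm1, h0, G, ignites]

theorem propagar_alt_eq_G (lista : List Int) : propagar_alt lista = G false lista := by
  show ((List.foldl propagarAltBwd ([], false)
      (lista.reverse.zip ((List.foldl propagarAltFwd ([], false) lista).1).reverse)).1).reverse
    = G false lista
  rw [fwd_eq_F lista false, bwd_main lista false]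
  simp

-- ===== VERDICT (by name: the statement is the Claim_ definition above) =====
theorem propagar_spec : Claim_equal_propagar := by
  intro lista _
  unfold Spec_propagar
  rw [propagar_eq_G, propagar_alt_eq_G]
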